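-- pv_equiv track=rewrite | github.com/MrBrantCode/unitest_baseline | mut_generate/mist_train_cf/cf_255/solution.py | check_sum_and_product
-- ===== SOURCE A (Python) =====
-- def check_sum_and_product(arr, target, threshold):
--     seen_numbers = set()
--     for num in arr:
--         if target - num in seen_numbers:
--             product = num * (target - num)
--             if product > threshold:
--                 return True
--         seen_numbers.add(num)
--     return False
-- ===== SOURCE B (Python) =====
-- def check_sum_and_product(arr, target, threshold):
--     for i in range(len(arr)):
--         for j in range(i):
--             if arr[i] + arr[j] == target and arr[i] * arr[j] > threshold:
--                 return True
--     return False
-- ===== Notes on version B (the rewrite author's own statement) =====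
-- stated objective: simpler
-- what changed: Replaced the hash-set single pass over complements with a direct brute-force scan over distinct index pairs (j < i), maintaining no auxiliary structure.
import Mathlib
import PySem

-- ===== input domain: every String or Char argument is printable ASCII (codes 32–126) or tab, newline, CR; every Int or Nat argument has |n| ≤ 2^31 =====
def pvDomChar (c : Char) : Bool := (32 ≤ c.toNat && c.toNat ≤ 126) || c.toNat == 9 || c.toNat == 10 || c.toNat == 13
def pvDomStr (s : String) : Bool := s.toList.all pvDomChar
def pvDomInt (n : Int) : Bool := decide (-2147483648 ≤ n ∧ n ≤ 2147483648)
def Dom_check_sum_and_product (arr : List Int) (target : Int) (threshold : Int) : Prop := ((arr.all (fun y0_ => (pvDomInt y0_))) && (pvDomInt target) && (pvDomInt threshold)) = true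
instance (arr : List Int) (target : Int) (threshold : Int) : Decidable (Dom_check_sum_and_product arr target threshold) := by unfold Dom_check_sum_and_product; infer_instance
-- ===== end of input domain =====

-- B replaces A's hash-set single pass with a direct brute-force scan over distinct index pairs (simpler; no auxiliary structure).


-- ===== PORT A =====
-- loop over arr with the set seen_numbers; early return becomes returning true
def csapLoopA (target threshold : Int) (seen : PySem.Set Int) : List Int → Bool
  | [] => false
  | num :: rest =>
    if PySem.Set.contains seen (target - num) then
      if num * (target - num) > threshold then true
      else csapLoopA target threshold (PySem.Set.add seen num) rest
    else csapLoopA target threshold (PySem.Set.add seen num) rest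

def check_sum_and_product (arr : List Int) (target : Int) (threshold : Int) : Bool :=
  csapLoopA target threshold PySem.Set.empty arr

-- ===== PORT B =====
-- outer loop over positions i; the inner loop 'for j in range(i)' is a scan of the prefix before i
def csapLoopB (target threshold : Int) (pre : List Int) : List Int → Bool
  | [] => false
  | x :: rest =>
    if pre.any (fun y => decide (x + y = target) && decide (x * y > threshold)) then true
    else csapLoopB target threshold (pre ++ [x]) rest

def check_sum_and_product_alt (arr : List Int) (target : Int) (threshold : Int) : Bool :=
  csapLoopB target threshold [] arr

-- ===== PRECONDITION & SPEC =====
def Spec_check_sum_and_product (arr : List Int) (target : Int) (threshold : Int) (out : Bool) : Prop := out = check_sum_and_product_alt arr target threshold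
instance (arr : List Int) (target : Int) (threshold : Int) (out : Bool) : Decidable (Spec_check_sum_and_product arr target threshold out) := by unfold Spec_check_sum_and_product; infer_instance

-- ===== CLAIM (what is proved, stated in full; the proofs are below) =====
def Claim_equal_check_sum_and_product : Prop := ∀ (arr : List Int) (target : Int) (threshold : Int), Dom_check_sum_and_product arr target threshold → Spec_check_sum_and_product arr target threshold (check_sum_and_product arr target threshold)

-- ===== LEMMAS AND PROOFS =====

-- the inner prefix scan of B equals "complement is in the prefix and the product clears the threshold"
lemma any_pair_eq (t th x : Int) (pre : List Int) :
    pre.any (fun y => decide (x + y = t) && decide (x * y > th))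
      = (pre.contains (t - x) && decide (x * (t - x) > th)) := by
  induction pre with
  | nil => simp
  | cons y ys ih =>
    simp only [List.any_cons, List.contains_cons, ih]
    by_cases h : y = t - x
    · subst h
      simp only [beq_self_eq_true, Bool.true_or, Bool.true_and]
      have hx : x + (t - x) = t := by ring
      simp [hx]
    · have h1 : ¬ (x + y = t) := by omega
      have h2 : ((t - x : Int) == y) = false := by
        simp [beq_eq_false_iff_ne]; omega
      simp [h1, h2]

lemma set_contains_ofList (pre : List Int) (z : Int) :
    PySem.Set.contains (PySem.Set.ofList pre) z = pre.contains z := by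
  by_cases h : z ∈ pre
  · have : PySem.Set.contains (PySem.Set.ofList pre) z = true :=
      (PySem.Set.contains_iff _ _).mpr ((PySem.Set.mem_ofList _ _).mpr h)
    simp [h]
  · have : ¬ PySem.Set.contains (PySem.Set.ofList pre) z = true := by
      intro hc; exact h ((PySem.Set.mem_ofList _ _).mp ((PySem.Set.contains_iff _ _).mp hc))
    simp only [Bool.not_eq_true] at this
    simp [this, h]

lemma ofList_append_singleton (pre : List Int) (x : Int) :
    PySem.Set.ofList (pre ++ [x]) = PySem.Set.add (PySem.Set.ofList pre) x := by
  simp [PySem.Set.ofList_eq_foldl, List.foldl_append]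

lemma loops_eq (t th : Int) (l : List Int) :
    ∀ pre, csapLoopA t th (PySem.Set.ofList pre) l = csapLoopB t th pre l := by
  induction l with
  | nil => intro pre; simp [csapLoopA, csapLoopB]
  | cons x rest ih =>
    intro pre
    simp only [csapLoopA, csapLoopB, any_pair_eq, set_contains_ofList,
      ← ofList_append_singleton, ih]
    by_cases hc : (t - x) ∈ pre
    · by_cases hp : th < x * (t - x)
      · simp [hc, hp]
      · simp [hc, hp]
    · simp [hc]

-- ===== VERDICT (by name: the statement is the Claim_ definition above) =====
theorem check_sum_and_product_spec : Claim_equal_check_sum_and_product := by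
  intro arr target threshold _
  unfold Spec_check_sum_and_product check_sum_and_product check_sum_and_product_alt
  exact loops_eq target threshold arr []
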